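-- pv_equiv track=rewrite | github.com/galazat/MD4_algorithm | MD4.py | Mod512
-- ===== SOURCE A (Python) =====
-- def Mod512(text):
--     # расширяет текст и делит на блоки по 512 бит
--     tmp = text.encode('utf-8')
--     if (tmp[len(tmp)-1]==10):
--         text_byte = tmp[0:len(tmp)-1]
--     else:
--         text_byte = tmp[0:len(tmp)]
--     text_bit = [bin(text_byte[i])[2:].zfill(8) for i in range(0, len(text_byte))]
--     text_bit.append('10000000')
--     while ((len(text_bit)*8)%512 != 448):
--         text_bit.append('00000000')
--     tmp = list(bin(len(text_byte*8))[2:].zfill(64))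
--     part1 = tmp[0:32]
--     part2 = tmp[32:64]
--     text_bit.append(''.join(part2[24:32]))
--     text_bit.append(''.join(part2[16:24]))
--     text_bit.append(''.join(part2[8:16]))
--     text_bit.append(''.join(part2[0:8]))
--
--     text_bit.append(''.join(part1[24:32]))
--     text_bit.append(''.join(part1[16:24]))
--     text_bit.append(''.join(part1[8:16]))
--     text_bit.append(''.join(part1[0:8]))
--
--     part512 = [''.join(text_bit[i+j] for i in range(0,64)) for j in range(0,len(text_bit),64)]
--     return part512
-- ===== SOURCE B (Python) =====
-- def Mod512(text):
--     # Virtual padding: never materialize a padded buffer or bit list.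
--     # Closed-form block count; each output block is generated directly from an
--     # index -> 8-bit-row function (message byte / 0x80 / zero / length byte).
--     tmp = text.encode('utf-8')
--     n = len(tmp) - 1 if tmp[len(tmp) - 1] == 10 else len(tmp)
--     total = ((n + 9 + 63) // 64) * 64          # padded length in bytes
--     s64 = bin(n * 8)[2:].zfill(64)             # same length field as the original
--
--     def row(i):
--         if i < n:
--             return format(tmp[i], '08b')
--         if i == n:
--             return '10000000'
--         if i >= total - 8:
--             k = i - (total - 8)
--             return s64[64 - 8 * (k + 1):64 - 8 * k]
--         return '00000000'
--
--     return [''.join(row(64 * b + i) for i in range(64)) for b in range(total // 64)]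
-- ===== Notes on version B (the rewrite author's own statement) =====
-- stated objective: alternative
-- what changed: B never materializes a padded message: it computes the padded length in closed form and generates each 512-bit block directly from an index->row function (message byte / 0x80 marker / zero filler / length-field slice), instead of A's mutable list grown by a while loop, hand-unrolled length appends and a final chunking pass.
import Mathlib
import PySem

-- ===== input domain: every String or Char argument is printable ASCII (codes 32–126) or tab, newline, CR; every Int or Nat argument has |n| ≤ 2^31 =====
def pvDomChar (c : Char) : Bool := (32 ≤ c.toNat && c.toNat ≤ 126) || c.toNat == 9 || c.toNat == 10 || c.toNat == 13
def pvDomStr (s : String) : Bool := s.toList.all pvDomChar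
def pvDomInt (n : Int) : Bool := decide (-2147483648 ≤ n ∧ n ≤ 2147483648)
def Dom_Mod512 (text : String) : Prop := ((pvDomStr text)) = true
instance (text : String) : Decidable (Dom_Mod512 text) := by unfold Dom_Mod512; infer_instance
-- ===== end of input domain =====

-- B never builds a padded message: it computes the padded length in closed form and generates each
-- 512-bit block directly from an index->row function, instead of A's mutable list grown by a while
-- loop, hand-unrolled length appends and a final chunking pass (objective: alternative; return value only).

-- bin(b)[2:].zfill(8) / format(b,'08b') — written identically in both Pythons
def pvBin8 (b : Nat) : List Char := PySem.Chars.zfill (PySem.Int.toBinChars (b : Int)) 8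

-- ===== PORT A =====
-- the while loop of A: append '00000000' until (len*8) % 512 == 448.
-- Totality via fuel only: 64 iterations always suffice (pvPadLoop_eq below proves the fuel is never exhausted).
def pvPadLoop : Nat → List String → List String
  | 0, bits => bits
  | fuel + 1, bits =>
    if (bits.length * 8) % 512 ≠ 448 then pvPadLoop fuel (bits ++ ["00000000"]) else bits

def Mod512 (text : String) : List String :=
  -- text.encode('utf-8'): on Dom (ASCII) the byte values are the char codes
  let tmp : List Nat := text.toList.map Char.toNat
  -- tmp[len(tmp)-1]: raises on empty input (excluded by Pre_); pyGetD is exact inside Pre_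
  let text_byte : List Nat :=
    if PySem.List.pyGetD tmp ((tmp.length : Int) - 1) 0 = 10 then
      PySem.List.slice tmp (some 0) (some ((tmp.length : Int) - 1))
    else
      PySem.List.slice tmp (some 0) (some (tmp.length : Int))
  let text_bit : List String :=
    (PySem.List.pyRange 0 (text_byte.length : Int) 1).map
      (fun i => String.ofList (pvBin8 (PySem.List.pyGetD text_byte i 0)))
  let text_bit := text_bit ++ ["10000000"]
  let text_bit := pvPadLoop 64 text_bit
  -- tmp = list(bin(len(text_byte*8))[2:].zfill(64))
  let tmp2 : List Char :=
    PySem.Chars.zfill (PySem.Int.toBinChars (((List.replicate 8 text_byte).flatten).length : Int)) 64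
  let part1 := PySem.List.slice tmp2 (some 0) (some 32)
  let part2 := PySem.List.slice tmp2 (some 32) (some 64)
  let text_bit := text_bit ++
    [String.ofList (PySem.List.slice part2 (some 24) (some 32)),
     String.ofList (PySem.List.slice part2 (some 16) (some 24)),
     String.ofList (PySem.List.slice part2 (some 8) (some 16)),
     String.ofList (PySem.List.slice part2 (some 0) (some 8)),
     String.ofList (PySem.List.slice part1 (some 24) (some 32)),
     String.ofList (PySem.List.slice part1 (some 16) (some 24)),
     String.ofList (PySem.List.slice part1 (some 8) (some 16)),
     String.ofList (PySem.List.slice part1 (some 0) (some 8))]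
  -- indices i+j are always in range (the row count is a multiple of 64), so pyGetD is exact
  (PySem.List.pyRange 0 (text_bit.length : Int) 64).map
    (fun j => PySem.Str.join "" ((PySem.List.pyRange 0 64 1).map
      (fun i => PySem.List.pyGetD text_bit (i + j) "")))

-- ===== PORT B =====
-- def row(i): the index -> 8-bit-row function of Source B (indices are Nat; Python's are the same
-- non-negative ints here). ''.join of 8-char rows is ported as flatten (empty separator).
def pvRowB (tmp : List Nat) (n total : Nat) (s64 : List Char) (i : Nat) : List Char :=
  if i < n then pvBin8 (PySem.List.pyGetD tmp (i : Int) 0)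
  else if i = n then "10000000".toList
  else if total - 8 ≤ i then
    PySem.List.slice s64 (some ((64 - 8 * ((i - (total - 8)) + 1) : Nat) : Int))
      (some ((64 - 8 * (i - (total - 8)) : Nat) : Int))
  else "00000000".toList

def Mod512_alt (text : String) : List String :=
  let tmp : List Nat := text.toList.map Char.toNat
  -- tmp[len(tmp)-1]==10: raises on empty input, excluded by Pre_
  let n : Nat :=
    if PySem.List.pyGetD tmp ((tmp.length : Int) - 1) 0 = 10 then tmp.length - 1 else tmp.length
  let total : Nat := ((n + 9 + 63) / 64) * 64
  let s64 : List Char := PySem.Chars.zfill (PySem.Int.toBinChars ((n : Int) * 8)) 64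
  (List.range (total / 64)).map (fun b =>
    String.ofList (((List.range 64).map (fun i => pvRowB tmp n total s64 (64 * b + i))).flatten))

-- ===== PRECONDITION & SPEC =====
-- Pre_ excludes only the empty string, on which A raises IndexError (tmp[len(tmp)-1] on b''); B raises there too
def Pre_Mod512 (text : String) : Prop := text ≠ ""
instance (text : String) : Decidable (Pre_Mod512 text) := by unfold Pre_Mod512; infer_instance
def pvWitness_Mod512 : String := "abc"

def Spec_Mod512 (text : String) (out : List String) : Prop := out = Mod512_alt text
instance (text : String) (out : List String) : Decidable (Spec_Mod512 text out) := by unfold Spec_Mod512; infer_instance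

-- ===== CLAIM (what is proved, stated in full; the proofs are below) =====
def Claim_equal_Mod512 : Prop := ∀ (text : String), Dom_Mod512 text → Pre_Mod512 text → Spec_Mod512 text (Mod512 text)

-- ===== LEMMAS AND PROOFS =====

lemma pv_join_flatten (parts : List (List Char)) : PySem.Chars.join [] parts = parts.flatten := by
  induction parts with
  | nil => simp [PySem.Chars.join_nil]
  | cons p rest ih =>
    cases rest with
    | nil => simp [PySem.Chars.join_singleton]
    | cons q r => rw [PySem.Chars.join_cons_cons]; simp_all

lemma pv_strjoin (parts : List String) :
    PySem.Str.join "" parts = String.ofList (parts.map String.toList).flatten := by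
  have h := PySem.Str.toList_join "" parts
  calc PySem.Str.join "" parts = String.ofList ((PySem.Str.join "" parts).toList) :=
        String.ofList_toList.symm
    _ = _ := by rw [h]; congr 1; exact pv_join_flatten _

lemma pv_map_getD_range {α : Type} (xs : List α) (k : Nat) (d : α) (hk : k ≤ xs.length) :
    (List.range k).map (fun i => xs.getD i d) = xs.take k := by
  apply List.ext_getElem
  · simp [hk]
  · intro i h1 h2
    simp only [List.getElem_map, List.getElem_range, List.getElem_take]
    have hi : i < xs.length := by simp at h2; omega
    simp [List.getD_eq_getElem?_getD, List.getElem?_eq_getElem hi]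

lemma pv_pyRange_mul (s : Int) (m : Nat) (hs : 0 < s) :
    PySem.List.pyRange 0 (s * m) s = (List.range m).map (fun k : Nat => s * (k : Int)) := by
  rw [PySem.List.pyRange_of_pos 0 (s * m) hs]
  rcases Nat.eq_zero_or_pos m with hm | hm
  · simp [hm]
  · have hlt : (0:Int) < s * m := by positivity
    rw [if_pos hlt]
    have : ((s * (m:Int) - 0 + s - 1) / s).toNat = m := by
      have : s * (m:Int) - 0 + s - 1 = (s - 1) + s * m := by ring
      rw [this, Int.add_mul_ediv_left _ _ (by omega)]
      rw [Int.ediv_eq_zero_of_lt (by omega) (by omega)]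
      omega
    rw [this]
    simp only [zero_add]

lemma pvPadLoop_eq (fuel : Nat) (bits : List String)
    (hf : (56 + 64 - bits.length % 64) % 64 ≤ fuel) :
    pvPadLoop fuel bits = bits ++ List.replicate ((56 + 64 - bits.length % 64) % 64) "00000000" := by
  induction fuel generalizing bits with
  | zero =>
    have : (56 + 64 - bits.length % 64) % 64 = 0 := by omega
    simp [pvPadLoop, this]
  | succ fuel ih =>
    rw [pvPadLoop]
    split_ifs with h
    · rw [ih (bits ++ ["00000000"]) (by simp; omega)]
      have hr : (56 + 64 - bits.length % 64) % 64 =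
          (56 + 64 - (bits ++ ["00000000"]).length % 64) % 64 + 1 := by
        simp only [List.length_append, List.length_singleton]
        omega
      rw [hr, List.replicate_succ, List.append_assoc]
      rfl
    · have : (56 + 64 - bits.length % 64) % 64 = 0 := by omega
      simp [this]

-- chunking: reading a (64*m)-row table in 64-row groups via pyRange/pyGetD (A's final pass)
-- is the per-block generation from the row function (B's comprehension)
lemma pv_chunked (f : Nat → List Char) (total m : Nat) (hm : total = 64 * m) :
    (PySem.List.pyRange 0 (((List.range total).map (fun j => String.ofList (f j))).length : Int) 64).map
        (fun j => PySem.Str.join "" ((PySem.List.pyRange 0 64 1).map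
          (fun i => PySem.List.pyGetD ((List.range total).map (fun j => String.ofList (f j))) (i + j) ""))) =
      (List.range m).map (fun b =>
        String.ofList (((List.range 64).map (fun i => f (64 * b + i))).flatten)) := by
  set rows := (List.range total).map (fun j => String.ofList (f j)) with hrows
  have hlen : rows.length = 64 * m := by simp [hrows, hm]
  rw [hlen, show ((64 * m : Nat) : Int) = (64 : Int) * m by push_cast; ring,
      pv_pyRange_mul 64 m (by norm_num), List.map_map]
  apply List.map_congr_left
  intro t ht
  have ht' : t < m := List.mem_range.1 ht
  simp only [Function.comp]
  have hmap : (PySem.List.pyRange 0 64 1).map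
      (fun i => PySem.List.pyGetD rows (i + 64 * (t : Int)) "") = (rows.drop (64 * t)).take 64 := by
    rw [PySem.List.pyRange_one, List.map_map]
    have hcongr : ∀ k ∈ List.range ((64 - 0 : Int)).toNat,
        ((fun i => PySem.List.pyGetD rows (i + 64 * (t : Int)) "") ∘ (fun k : Nat => (0 : Int) + k)) k
          = (rows.drop (64 * t)).getD k "" := by
      intro k hk
      simp only [Function.comp]
      have hc : (0 : Int) + (k : Int) + 64 * (t : Int) = ((64 * t + k : Nat) : Int) := by
        push_cast; ring
      rw [hc, PySem.List.pyGetD_natCast]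
      simp [List.getD_eq_getElem?_getD, List.getElem?_drop]
    rw [List.map_congr_left hcongr]
    have h64 : ((64 - 0 : Int)).toNat = 64 := by decide
    rw [h64, pv_map_getD_range _ 64 "" (by rw [List.length_drop, hlen]; omega)]
  rw [hmap]
  have hdt : (rows.drop (64 * t)).take 64
      = ((List.range 64).map (fun i => 64 * t + i)).map (fun j => String.ofList (f j)) := by
    rw [hrows, show total = 64 * t + (total - 64 * t) by omega, List.range_add,
        List.map_append, List.drop_append_of_le_length (by simp),
        List.drop_of_length_le (by simp), List.nil_append, ← List.map_take, ← List.map_take,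
        List.take_range, show min 64 (total - 64 * t) = 64 by omega, List.map_map]
  rw [hdt, pv_strjoin, List.map_map, List.map_map]
  congr 1
  congr 1
  apply List.map_congr_left
  intro i _
  simp [Function.comp]

-- the heart: A's padded row list, rewritten by pvPadLoop_eq, IS the range-indexed table of B's row function
set_option maxHeartbeats 1000000 in
lemma pv_rows (tmp : List Nat) (n : Nat) :
    (List.range n).map (fun i => String.ofList (pvBin8 ((tmp.take n).getD i 0))) ++ ["10000000"] ++
        List.replicate ((56 + 64 - (n + 1) % 64) % 64) "00000000" ++
        [String.ofList (PySem.List.slice (PySem.List.slice (PySem.Chars.zfill (PySem.Int.toBinChars ((n : Int) * 8)) 64) (some 32) (some 64)) (some 24) (some 32)),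
         String.ofList (PySem.List.slice (PySem.List.slice (PySem.Chars.zfill (PySem.Int.toBinChars ((n : Int) * 8)) 64) (some 32) (some 64)) (some 16) (some 24)),
         String.ofList (PySem.List.slice (PySem.List.slice (PySem.Chars.zfill (PySem.Int.toBinChars ((n : Int) * 8)) 64) (some 32) (some 64)) (some 8) (some 16)),
         String.ofList (PySem.List.slice (PySem.List.slice (PySem.Chars.zfill (PySem.Int.toBinChars ((n : Int) * 8)) 64) (some 32) (some 64)) (some 0) (some 8)),
         String.ofList (PySem.List.slice (PySem.List.slice (PySem.Chars.zfill (PySem.Int.toBinChars ((n : Int) * 8)) 64) (some 0) (some 32)) (some 24) (some 32)),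
         String.ofList (PySem.List.slice (PySem.List.slice (PySem.Chars.zfill (PySem.Int.toBinChars ((n : Int) * 8)) 64) (some 0) (some 32)) (some 16) (some 24)),
         String.ofList (PySem.List.slice (PySem.List.slice (PySem.Chars.zfill (PySem.Int.toBinChars ((n : Int) * 8)) 64) (some 0) (some 32)) (some 8) (some 16)),
         String.ofList (PySem.List.slice (PySem.List.slice (PySem.Chars.zfill (PySem.Int.toBinChars ((n : Int) * 8)) 64) (some 0) (some 32)) (some 0) (some 8))]
      = (List.range (((n + 9 + 63) / 64) * 64)).map (fun j => String.ofList
          (pvRowB tmp n (((n + 9 + 63) / 64) * 64)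
            (PySem.Chars.zfill (PySem.Int.toBinChars ((n : Int) * 8)) 64) j)) := by
  set s64 := PySem.Chars.zfill (PySem.Int.toBinChars ((n : Int) * 8)) 64 with hs64
  set c := (56 + 64 - (n + 1) % 64) % 64 with hc
  set total := ((n + 9 + 63) / 64) * 64 with htotal
  have htot : total = n + 1 + c + 8 := by rw [htotal, hc]; omega
  have h1c : List.range (1 + c) = 0 :: (List.range c).map (1 + ·) := by
    rw [List.range_add]; simp
  rw [htot, show n + 1 + c + 8 = (n + (1 + c)) + 8 by omega, List.range_add, List.range_add,
      List.map_append, List.map_append, List.map_map, List.map_map, h1c, List.map_cons,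
      List.map_map]
  have Hmsg : ∀ i ∈ List.range n, String.ofList (pvBin8 ((tmp.take n).getD i 0))
      = String.ofList (pvRowB tmp n (n + (1 + c) + 8) s64 i) := by
    intro i hi
    have hi' : i < n := List.mem_range.1 hi
    rw [pvRowB, if_pos hi', PySem.List.pyGetD_natCast]
    congr 2
    simp [List.getD_eq_getElem?_getD, hi']
  have Hone : ((fun j => String.ofList (pvRowB tmp n (n + (1 + c) + 8) s64 j)) ∘ fun x => n + x) 0
      = "10000000" := by
    simp only [Function.comp, Nat.add_zero]
    rw [pvRowB, if_neg (by omega), if_pos rfl, String.ofList_toList]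
  have Hzero : ∀ k ∈ List.range c,
      (((fun j => String.ofList (pvRowB tmp n (n + (1 + c) + 8) s64 j)) ∘ fun x => n + x) ∘ fun x => 1 + x) k
        = "00000000" := by
    intro k hk
    have hk' : k < c := List.mem_range.1 hk
    simp only [Function.comp]
    rw [pvRowB, if_neg (by omega), if_neg (by omega), if_neg (by omega), String.ofList_toList]
  have hle : ∀ k, k < 8 → pvRowB tmp n (n + (1 + c) + 8) s64 (n + (1 + c) + k)
      = PySem.List.slice s64 (some ((64 - 8 * (k + 1) : Nat) : Int)) (some ((64 - 8 * k : Nat) : Int)) := by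
    intro k hk
    rw [pvRowB, if_neg (by omega), if_neg (by omega), if_pos (by omega)]
    have hkk : n + (1 + c) + k - (n + (1 + c) + 8 - 8) = k := by omega
    rw [hkk]
  have H8 : List.map ((fun j => String.ofList (pvRowB tmp n (n + (1 + c) + 8) s64 j)) ∘ fun x => n + (1 + c) + x)
      (List.range 8)
      = [String.ofList (PySem.List.slice (PySem.List.slice s64 (some 32) (some 64)) (some 24) (some 32)),
         String.ofList (PySem.List.slice (PySem.List.slice s64 (some 32) (some 64)) (some 16) (some 24)),
         String.ofList (PySem.List.slice (PySem.List.slice s64 (some 32) (some 64)) (some 8) (some 16)),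
         String.ofList (PySem.List.slice (PySem.List.slice s64 (some 32) (some 64)) (some 0) (some 8)),
         String.ofList (PySem.List.slice (PySem.List.slice s64 (some 0) (some 32)) (some 24) (some 32)),
         String.ofList (PySem.List.slice (PySem.List.slice s64 (some 0) (some 32)) (some 16) (some 24)),
         String.ofList (PySem.List.slice (PySem.List.slice s64 (some 0) (some 32)) (some 8) (some 16)),
         String.ofList (PySem.List.slice (PySem.List.slice s64 (some 0) (some 32)) (some 0) (some 8))] := by
    rw [show List.range 8 = [0, 1, 2, 3, 4, 5, 6, 7] by decide]
    simp only [List.map_cons, List.map_nil, Function.comp]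
    rw [hle 0 (by omega), hle 1 (by omega), hle 2 (by omega), hle 3 (by omega),
        hle 4 (by omega), hle 5 (by omega), hle 6 (by omega), hle 7 (by omega)]
    norm_num [PySem.List.slice_natCast, PySem.List.slice_toNat, List.drop_take, List.take_take,
      List.drop_drop]
    simp
  rw [List.map_congr_left Hmsg, Hone, List.map_congr_left Hzero, List.map_const',
      List.length_range, H8]
  simp [List.append_assoc]

-- glue: A's body (with text_byte = tmp.take n) equals B's body
lemma pv_main (tmp : List Nat) (n : Nat) (hn : n ≤ tmp.length) :
    (PySem.List.pyRange 0 (((pvPadLoop 64 ((PySem.List.pyRange 0 (((tmp.take n).length : Int)) 1).map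
          (fun i => String.ofList (pvBin8 (PySem.List.pyGetD (tmp.take n) i 0))) ++ ["10000000"]) ++
        [String.ofList (PySem.List.slice (PySem.List.slice (PySem.Chars.zfill (PySem.Int.toBinChars (((List.replicate 8 (tmp.take n)).flatten).length : Int)) 64) (some 32) (some 64)) (some 24) (some 32)),
         String.ofList (PySem.List.slice (PySem.List.slice (PySem.Chars.zfill (PySem.Int.toBinChars (((List.replicate 8 (tmp.take n)).flatten).length : Int)) 64) (some 32) (some 64)) (some 16) (some 24)),
         String.ofList (PySem.List.slice (PySem.List.slice (PySem.Chars.zfill (PySem.Int.toBinChars (((List.replicate 8 (tmp.take n)).flatten).length : Int)) 64) (some 32) (some 64)) (some 8) (some 16)),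
         String.ofList (PySem.List.slice (PySem.List.slice (PySem.Chars.zfill (PySem.Int.toBinChars (((List.replicate 8 (tmp.take n)).flatten).length : Int)) 64) (some 32) (some 64)) (some 0) (some 8)),
         String.ofList (PySem.List.slice (PySem.List.slice (PySem.Chars.zfill (PySem.Int.toBinChars (((List.replicate 8 (tmp.take n)).flatten).length : Int)) 64) (some 0) (some 32)) (some 24) (some 32)),
         String.ofList (PySem.List.slice (PySem.List.slice (PySem.Chars.zfill (PySem.Int.toBinChars (((List.replicate 8 (tmp.take n)).flatten).length : Int)) 64) (some 0) (some 32)) (some 16) (some 24)),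
         String.ofList (PySem.List.slice (PySem.List.slice (PySem.Chars.zfill (PySem.Int.toBinChars (((List.replicate 8 (tmp.take n)).flatten).length : Int)) 64) (some 0) (some 32)) (some 8) (some 16)),
         String.ofList (PySem.List.slice (PySem.List.slice (PySem.Chars.zfill (PySem.Int.toBinChars (((List.replicate 8 (tmp.take n)).flatten).length : Int)) 64) (some 0) (some 32)) (some 0) (some 8))]).length : Int)) 64).map
      (fun j => PySem.Str.join "" ((PySem.List.pyRange 0 64 1).map
        (fun i => PySem.List.pyGetD (pvPadLoop 64 ((PySem.List.pyRange 0 (((tmp.take n).length : Int)) 1).map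
          (fun i => String.ofList (pvBin8 (PySem.List.pyGetD (tmp.take n) i 0))) ++ ["10000000"]) ++
        [String.ofList (PySem.List.slice (PySem.List.slice (PySem.Chars.zfill (PySem.Int.toBinChars (((List.replicate 8 (tmp.take n)).flatten).length : Int)) 64) (some 32) (some 64)) (some 24) (some 32)),
         String.ofList (PySem.List.slice (PySem.List.slice (PySem.Chars.zfill (PySem.Int.toBinChars (((List.replicate 8 (tmp.take n)).flatten).length : Int)) 64) (some 32) (some 64)) (some 16) (some 24)),
         String.ofList (PySem.List.slice (PySem.List.slice (PySem.Chars.zfill (PySem.Int.toBinChars (((List.replicate 8 (tmp.take n)).flatten).length : Int)) 64) (some 32) (some 64)) (some 8) (some 16)),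
         String.ofList (PySem.List.slice (PySem.List.slice (PySem.Chars.zfill (PySem.Int.toBinChars (((List.replicate 8 (tmp.take n)).flatten).length : Int)) 64) (some 32) (some 64)) (some 0) (some 8)),
         String.ofList (PySem.List.slice (PySem.List.slice (PySem.Chars.zfill (PySem.Int.toBinChars (((List.replicate 8 (tmp.take n)).flatten).length : Int)) 64) (some 0) (some 32)) (some 24) (some 32)),
         String.ofList (PySem.List.slice (PySem.List.slice (PySem.Chars.zfill (PySem.Int.toBinChars (((List.replicate 8 (tmp.take n)).flatten).length : Int)) 64) (some 0) (some 32)) (some 16) (some 24)),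
         String.ofList (PySem.List.slice (PySem.List.slice (PySem.Chars.zfill (PySem.Int.toBinChars (((List.replicate 8 (tmp.take n)).flatten).length : Int)) 64) (some 0) (some 32)) (some 8) (some 16)),
         String.ofList (PySem.List.slice (PySem.List.slice (PySem.Chars.zfill (PySem.Int.toBinChars (((List.replicate 8 (tmp.take n)).flatten).length : Int)) 64) (some 0) (some 32)) (some 0) (some 8))]) (i + j) "")))
      = (List.range ((((n + 9 + 63) / 64) * 64) / 64)).map (fun b =>
          String.ofList (((List.range 64).map (fun i => pvRowB tmp n (((n + 9 + 63) / 64) * 64) (PySem.Chars.zfill (PySem.Int.toBinChars ((n : Int) * 8)) 64) (64 * b + i))).flatten)) := by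
  have hdl : (tmp.take n).length = n := by simp [hn]
  have hns : (((List.replicate 8 (tmp.take n)).flatten).length : Int) = (n : Int) * 8 := by
    have h8 : (List.replicate 8 (tmp.take n)).flatten.length = 8 * n := by simp [hdl]; ring
    rw [h8]; push_cast; ring
  rw [hns]
  have hmsg : (PySem.List.pyRange 0 (((tmp.take n).length : Int)) 1).map
      (fun i => String.ofList (pvBin8 (PySem.List.pyGetD (tmp.take n) i 0)))
        = (List.range n).map (fun i => String.ofList (pvBin8 ((tmp.take n).getD i 0))) := by
    rw [PySem.List.pyRange_one, List.map_map]
    have hN : (((tmp.take n).length : Int) - 0).toNat = n := by rw [hdl]; omega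
    rw [hN]
    apply List.map_congr_left
    intro k hk
    simp only [Function.comp, zero_add, PySem.List.pyGetD_natCast]
  rw [hmsg, pvPadLoop_eq 64 _ (by simp; omega)]
  rw [show ((List.range n).map (fun i => String.ofList (pvBin8 ((tmp.take n).getD i 0)))
      ++ ["10000000"]).length = n + 1 from by simp]
  rw [pv_rows tmp n]
  exact pv_chunked (pvRowB tmp n (((n + 9 + 63) / 64) * 64) (PySem.Chars.zfill (PySem.Int.toBinChars ((n : Int) * 8)) 64)) (((n + 9 + 63) / 64) * 64) ((((n + 9 + 63) / 64) * 64) / 64) (by omega)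

-- ===== VERDICT (by name: the statement is the Claim_ definition above) =====
theorem Mod512_spec : Claim_equal_Mod512 := by
  intro text _hdom hpre
  show Mod512 text = Mod512_alt text
  simp only [Mod512, Mod512_alt]
  have hne : text.toList ≠ [] := by
    simp only [ne_eq, String.toList_eq_nil_iff]; exact hpre
  have hlen1 : 1 ≤ (text.toList.map Char.toNat).length := by
    rw [List.length_map]; exact List.length_pos_iff.2 hne
  set tmp := text.toList.map Char.toNat with htmp
  split_ifs with h10
  · -- newline stripped: n = len - 1
    set n := tmp.length - 1 with hn
    have hcast : (tmp.length : Int) - 1 = ((n : Nat) : Int) := by omega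
    rw [hcast, PySem.List.slice_zero_start, PySem.List.slice_to_natCast]
    exact pv_main tmp n (by omega)
  · -- no stripping: n = len
    rw [PySem.List.slice_zero_start, PySem.List.slice_to_natCast]
    exact pv_main tmp tmp.length le_rfl
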